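-- pv_equiv track=rewrite | github.com/yu6853/SleepLLM | Sleep2.0/utils/preprocess.py | _get_snoring_count_per_hour
-- ===== SOURCE A (Python) =====
-- min_snore_interval = 2  # 2秒
--
-- def _get_snoring_count_per_hour(data):
--     # 打鼾次数
--     snoring = [row[0] == 5 for row in data]
--     movement = [row[0] == 2 for row in data]  # 获取状态为体动的布尔列表
--     # sleeping = [(row[0] != 1) and (row[0] != 2) and (row[0] != 4) for row in data]
--     # count = 0
--     # sleep_started = False
--     valid_snoring_counts = 0  # 有效打鼾次数
--     last_snore_time = -min_snore_interval  # 用于存储上一次有效体动的打鼾，初始化为一个负值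
--
--     # 检查有效的打鼾次数
--     for i in range(len(snoring)):
--         # # 判断是否进入了有效的睡眠状态（即连续睡眠超过60秒）
--         # if sleeping[i]:  # 在床、打鼾、弱呼吸状态视为睡眠
--         #     count += 1
--         #     if count >= min_sleep_time:  # 进入有效的睡眠状态
--         #         sleep_started = True
--         # else:
--         #     count = 0
--         #     sleep_started = False  # 退出睡眠状态
--
--         # # 如果没有进入有效睡眠状态，跳过打鼾检测
--         # if not sleep_started:
--         #     continue
--
--         # 如果进入了有效睡眠状态，继续统计打鼾次数
--         if snoring[i]:
--             # 检查前后6秒是否有体动，若有则不计入打鼾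
--             if (i >= 6 and any(movement[j] for j in range(i - 6, i))) or (
--                     i <= len(data) - 7 and any(movement[j] for j in range(i + 1, i + 7))):
--                 continue
--
--             # 仅在当前打鼾的时间与上一次有效打鼾的时间间隔大于等于2秒时，才计为新的打鼾
--             if i - last_snore_time >= last_snore_time:
--                 valid_snoring_counts += 1  # 计入一次有效打鼾
--             last_snore_time = i  # 更新上一次有效打鼾的时间为当前的i
--         # 这里不需要 else，因为如果不是打鼾，继续遍历即可
--
--     # # 过滤打鼾次数
--     # if valid_snoring_counts < 10:
--     #     snoring_filtered.append(0)  # 打鼾少于10次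
--     # elif valid_snoring_counts <= 30:
--     #     snoring_filtered.append(1)  # 打鼾少于等于30次
--     # elif valid_snoring_counts <= 200:
--     #     snoring_filtered.append(2)  # 打鼾少于等于200次
--     # else:
--     #     snoring_filtered.append(3)  # 打鼾超过200次
--     return valid_snoring_counts
-- ===== SOURCE B (Python) =====
-- min_snore_interval = 2  # 2秒
--
-- def _get_snoring_count_per_hour(data):
--     n = len(data)
--     # prefix sums over movement: pm[k] = number of movement rows among data[0:k]
--     pm = [0]
--     for row in data:
--         pm.append(pm[-1] + (1 if row[0] == 2 else 0))
--     valid_snoring_counts = 0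
--     last_snore_time = -min_snore_interval
--     for i in range(n):
--         if data[i][0] == 5:
--             if (i >= 6 and pm[i] - pm[i - 6] > 0) or (
--                     i <= n - 7 and pm[i + 7] - pm[i + 1] > 0):
--                 continue
--             if i - last_snore_time >= last_snore_time:
--                 valid_snoring_counts += 1
--             last_snore_time = i
--     return valid_snoring_counts
-- ===== Notes on version B (the rewrite author's own statement) =====
-- stated objective: alternative
-- what changed: B precomputes a prefix-sum array over the movement flags once and tests each 6-second window by two O(1) prefix-sum lookups, instead of A's per-snore-row inner any() scans over the window; Pre_ excludes data containing an empty row, on which A raises IndexError (so does B).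
import Mathlib
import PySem

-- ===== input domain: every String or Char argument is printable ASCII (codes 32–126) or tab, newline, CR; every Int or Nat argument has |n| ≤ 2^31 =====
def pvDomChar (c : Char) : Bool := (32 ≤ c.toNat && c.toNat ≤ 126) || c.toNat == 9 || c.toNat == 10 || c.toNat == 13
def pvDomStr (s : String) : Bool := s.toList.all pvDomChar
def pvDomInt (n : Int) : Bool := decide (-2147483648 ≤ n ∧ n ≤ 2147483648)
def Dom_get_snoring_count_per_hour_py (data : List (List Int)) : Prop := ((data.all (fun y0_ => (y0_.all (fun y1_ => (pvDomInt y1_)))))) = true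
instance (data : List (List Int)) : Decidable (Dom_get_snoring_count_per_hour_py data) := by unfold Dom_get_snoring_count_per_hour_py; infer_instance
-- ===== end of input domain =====

-- B replaces A's per-row inner scans of the 6-second movement windows by one precomputed
-- prefix-sum list over the movement flags, testing each window with two O(1) lookups.

-- ===== PORT A =====
def get_snoring_count_per_hour_py (data : List (List Int)) : Int :=
  let snoring : List Bool := data.map (fun row => PySem.List.pyGetD row 0 0 == 5)
  let movement : List Bool := data.map (fun row => PySem.List.pyGetD row 0 0 == 2)
  let st := (PySem.List.pyRange 0 (PySem.List.len snoring) 1).foldl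
    (fun (st : Int × Int) i =>
      if PySem.List.pyGetD snoring i false then
        if (decide (6 ≤ i) && (PySem.List.pyRange (i - 6) i 1).any
              (fun j => PySem.List.pyGetD movement j false))
           || (decide (i ≤ PySem.List.len data - 7) && (PySem.List.pyRange (i + 1) (i + 7) 1).any
              (fun j => PySem.List.pyGetD movement j false)) then
          st
        else
          ((if i - st.2 ≥ st.2 then st.1 + 1 else st.1), i)
      else st)
    (0, -2)
  st.1

-- ===== PORT B =====
def get_snoring_count_per_hour_py_alt (data : List (List Int)) : Int :=
  let n : Int := PySem.List.len data
  let pm : List Int := data.foldl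
    (fun pm row => pm ++ [PySem.List.pyGetD pm (-1) 0 +
      (if PySem.List.pyGetD row 0 0 == 2 then (1 : Int) else 0)]) [0]
  let st := (PySem.List.pyRange 0 n 1).foldl
    (fun (st : Int × Int) i =>
      if PySem.List.pyGetD (PySem.List.pyGetD data i []) 0 0 == 5 then
        if (decide (6 ≤ i) && decide (0 < PySem.List.pyGetD pm i 0 - PySem.List.pyGetD pm (i - 6) 0))
           || (decide (i ≤ n - 7) && decide (0 < PySem.List.pyGetD pm (i + 7) 0 - PySem.List.pyGetD pm (i + 1) 0)) then
          st
        else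
          ((if i - st.2 ≥ st.2 then st.1 + 1 else st.1), i)
      else st)
    (0, -2)
  st.1

-- ===== PRECONDITION & SPEC =====
-- Pre_ excludes data containing an empty row: there Python A raises IndexError on row[0] (so does B).
def Pre_get_snoring_count_per_hour_py (data : List (List Int)) : Prop := ∀ row ∈ data, row ≠ []
instance (data : List (List Int)) : Decidable (Pre_get_snoring_count_per_hour_py data) := by unfold Pre_get_snoring_count_per_hour_py; infer_instance
def pvWitness_get_snoring_count_per_hour_py : List (List Int) := [[5], [5], [2], [5], [1]]
def Spec_get_snoring_count_per_hour_py (data : List (List Int)) (out : Int) : Prop := out = get_snoring_count_per_hour_py_alt data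
instance (data : List (List Int)) (out : Int) : Decidable (Spec_get_snoring_count_per_hour_py data out) := by unfold Spec_get_snoring_count_per_hour_py; infer_instance

-- ===== CLAIM (what is proved, stated in full; the proofs are below) =====
def Claim_equal_get_snoring_count_per_hour_py : Prop := ∀ (data : List (List Int)), Dom_get_snoring_count_per_hour_py data → Pre_get_snoring_count_per_hour_py data → Spec_get_snoring_count_per_hour_py data (get_snoring_count_per_hour_py data)

-- ===== LEMMAS AND PROOFS =====

-- movement indicator of a row
def pvInd (row : List Int) : Bool := PySem.List.pyGetD row 0 0 == 2

-- number of movement rows among the first k rows, as an Int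
def pvCnt (data : List (List Int)) (k : Nat) : Int := ((data.take k).countP pvInd : Nat)

-- prefix-sum list starting from s
def pvScan (s : Int) : List (List Int) → List Int
  | [] => [s]
  | x :: xs => s :: pvScan (s + (if pvInd x then 1 else 0)) xs

theorem pvScan_foldl (l : List (List Int)) (pre : List Int) (s : Int) :
    l.foldl (fun pm row => pm ++ [PySem.List.pyGetD pm (-1) 0 +
      (if PySem.List.pyGetD row 0 0 == 2 then (1 : Int) else 0)]) (pre ++ [s])
    = pre ++ pvScan s l := by
  induction l generalizing pre s with
  | nil => simp [pvScan]
  | cons x xs ih =>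
    simp only [List.foldl_cons, PySem.List.pyGetD_neg_one_append_singleton, pvScan]
    rw [show (pre ++ [s]) ++ [s + (if PySem.List.pyGetD x 0 0 == 2 then (1 : Int) else 0)]
          = (pre ++ [s]) ++ [s + (if pvInd x then 1 else 0)] from by rfl,
        ih (pre ++ [s])]
    simp

theorem pvScan_getD (l : List (List Int)) (s : Int) (k : Nat) (hk : k ≤ l.length) :
    (pvScan s l).getD k 0 = s + ((l.take k).countP pvInd : Nat) := by
  induction l generalizing s k with
  | nil =>
    have h0 : k = 0 := by simpa using hk
    subst h0
    simp [pvScan]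
  | cons x xs ih =>
    cases k with
    | zero => simp [pvScan]
    | succ k =>
      simp only [pvScan, List.getD_cons_succ, List.take_succ_cons, List.countP_cons]
      rw [ih _ k (by simpa using hk)]
      by_cases h : pvInd x <;> simp [h, Int.add_assoc, Int.add_comm 1]

theorem pvCnt_succ (data : List (List Int)) (k : Nat) (hk : k < data.length) :
    pvCnt data (k + 1) = pvCnt data k + (if pvInd data[k] then 1 else 0) := by
  unfold pvCnt
  rw [List.take_add_one, List.getElem?_eq_getElem hk]
  simp only [Option.toList_some, List.countP_append, List.countP_cons, List.countP_nil]
  by_cases h : pvInd data[k] <;> simp [h]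

theorem pvCnt_mono (data : List (List Int)) (j k : Nat) (h : j ≤ k) :
    pvCnt data j ≤ pvCnt data k := by
  unfold pvCnt
  have : data.take j = (data.take k).take j := by rw [List.take_take, Nat.min_eq_left h]
  rw [this]
  have h2 := List.countP_le_length (p := pvInd) (l := data.take k)
  have h4 : ((data.take k).countP pvInd) = ((data.take k).take j).countP pvInd + ((data.take k).drop j).countP pvInd := by
    conv_lhs => rw [(List.take_append_drop j (data.take k)).symm]
    rw [List.countP_append]
  omega

theorem pvWindow (data : List (List Int)) (a m : Nat) (h : a + m ≤ data.length) :
    ((PySem.List.pyRange (a : Int) ((a : Int) + (m : Int)) 1).any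
        (fun j => PySem.List.pyGetD (data.map (fun row => PySem.List.pyGetD row 0 0 == 2)) j false))
    = decide (0 < pvCnt data (a + m) - pvCnt data a) := by
  induction m generalizing a with
  | zero =>
    rw [PySem.List.pyRange_one_eq_nil (by omega)]
    simp
  | succ m ih =>
    rw [PySem.List.pyRange_one_cons (by push_cast; omega)]
    have hcast : (a : Int) + 1 = ((a + 1 : Nat) : Int) := by push_cast; ring
    have hcast2 : (a : Int) + ((m + 1 : Nat) : Int) = ((a + 1 : Nat) : Int) + (m : Nat) := by push_cast; ring
    rw [List.any_cons, hcast, hcast2, ih (a + 1) (by omega)]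
    have hget : PySem.List.pyGetD (data.map (fun row => PySem.List.pyGetD row 0 0 == 2)) (a : Int) false
        = pvInd (data[a]'(by omega)) := by
      rw [PySem.List.pyGetD_natCast, List.getD_eq_getElem _ _ (by simpa using by omega : a < (data.map _).length)]
      simp [pvInd]
    have hsucc := pvCnt_succ data a (by omega)
    have hmono := pvCnt_mono data (a + 1) (a + 1 + m) (by omega)
    have harr : a + (m + 1) = a + 1 + m := by omega
    rw [hget, harr]
    by_cases hp : pvInd (data[a]'(by omega))
    · simp only [hp, Bool.true_or]
      simp only [hp, if_true] at hmono hsucc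
      have hlt : (0 : Int) < pvCnt data (a + 1 + m) - pvCnt data a := by omega
      symm
      simp only [decide_eq_true_eq]
      omega
    · simp only [hp, Bool.false_or]
      simp only [hp] at hsucc
      rw [hsucc]
      norm_num

theorem pvPm_getD (data : List (List Int)) (k : Nat) (hk : k ≤ data.length) :
    PySem.List.pyGetD (data.foldl
      (fun pm row => pm ++ [PySem.List.pyGetD pm (-1) 0 +
        (if PySem.List.pyGetD row 0 0 == 2 then (1 : Int) else 0)]) [0]) (k : Int) 0
    = pvCnt data k := by
  rw [show ([(0 : Int)]) = ([] : List Int) ++ [0] from rfl, pvScan_foldl, PySem.List.pyGetD_natCast]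
  simp only [List.nil_append]
  rw [pvScan_getD data 0 k hk]
  simp [pvCnt]

-- ===== VERDICT (by name: the statement is the Claim_ definition above) =====
theorem get_snoring_count_per_hour_py_spec : Claim_equal_get_snoring_count_per_hour_py := by
  intro data _ _
  unfold Spec_get_snoring_count_per_hour_py get_snoring_count_per_hour_py get_snoring_count_per_hour_py_alt
  simp only [show PySem.List.len (List.map (fun row => PySem.List.pyGetD row 0 0 == 5) data)
      = PySem.List.len data from by simp]
  congr 1
  apply PySem.List.foldl_congr_mem
  intro st i hi
  rw [PySem.List.mem_pyRange_one] at hi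
  obtain ⟨hi0, hin⟩ := hi
  rw [PySem.List.len_eq] at hin
  obtain ⟨k, rfl⟩ : ∃ k : Nat, i = (k : Int) := ⟨i.toNat, by omega⟩
  have hkn : k < data.length := by omega
  -- the snoring test
  have hsn : PySem.List.pyGetD (data.map (fun row => PySem.List.pyGetD row 0 0 == 5)) (k : Int) false
      = (PySem.List.pyGetD (PySem.List.pyGetD data (k : Int) []) 0 0 == 5) := by
    rw [PySem.List.pyGetD_natCast, PySem.List.pyGetD_natCast,
        List.getD_eq_getElem _ _ (by simpa using hkn), List.getD_eq_getElem _ _ hkn]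
    simp
  rw [hsn]
  by_cases hs : (PySem.List.pyGetD (PySem.List.pyGetD data (k : Int) []) 0 0 == 5) = true
  · rw [if_pos hs, if_pos hs]
    -- preceding window
    have hw1 : (decide (6 ≤ (k : Int)) && (PySem.List.pyRange ((k : Int) - 6) (k : Int) 1).any
          (fun j => PySem.List.pyGetD (data.map (fun row => PySem.List.pyGetD row 0 0 == 2)) j false))
        = (decide (6 ≤ (k : Int)) && decide (0 < PySem.List.pyGetD (data.foldl
            (fun pm row => pm ++ [PySem.List.pyGetD pm (-1) 0 +
              (if PySem.List.pyGetD row 0 0 == 2 then (1 : Int) else 0)]) [0]) (k : Int) 0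
            - PySem.List.pyGetD (data.foldl
            (fun pm row => pm ++ [PySem.List.pyGetD pm (-1) 0 +
              (if PySem.List.pyGetD row 0 0 == 2 then (1 : Int) else 0)]) [0]) ((k : Int) - 6) 0)) := by
      by_cases h6 : 6 ≤ (k : Int)
      · have hc1 : (k : Int) - 6 = ((k - 6 : Nat) : Int) := by omega
        have hc2 : (k : Int) = ((k - 6 : Nat) : Int) + ((6 : Nat) : Int) := by omega
        have hr : PySem.List.pyRange ((k : Int) - 6) (k : Int) 1
            = PySem.List.pyRange ((k - 6 : Nat) : Int) (((k - 6 : Nat) : Int) + ((6 : Nat) : Int)) 1 := by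
          rw [hc1]
          conv_lhs => rw [hc2]
        rw [hr, pvWindow data (k - 6) 6 (by omega),
            show k - 6 + 6 = k from by omega, hc1,
            pvPm_getD data k (by omega), pvPm_getD data (k - 6) (by omega)]
      · simp [h6]
    -- following window
    have hw2 : (decide ((k : Int) ≤ PySem.List.len data - 7) && (PySem.List.pyRange ((k : Int) + 1) ((k : Int) + 7) 1).any
          (fun j => PySem.List.pyGetD (data.map (fun row => PySem.List.pyGetD row 0 0 == 2)) j false))
        = (decide ((k : Int) ≤ PySem.List.len data - 7) && decide (0 < PySem.List.pyGetD (data.foldl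
            (fun pm row => pm ++ [PySem.List.pyGetD pm (-1) 0 +
              (if PySem.List.pyGetD row 0 0 == 2 then (1 : Int) else 0)]) [0]) ((k : Int) + 7) 0
            - PySem.List.pyGetD (data.foldl
            (fun pm row => pm ++ [PySem.List.pyGetD pm (-1) 0 +
              (if PySem.List.pyGetD row 0 0 == 2 then (1 : Int) else 0)]) [0]) ((k : Int) + 1) 0)) := by
      by_cases h7 : (k : Int) ≤ PySem.List.len data - 7
      · have h7' : (k : Int) ≤ (data.length : Int) - 7 := by rw [PySem.List.len_eq] at h7; exact h7
        have hc1 : (k : Int) + 1 = ((k + 1 : Nat) : Int) := by push_cast; ring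
        have hc7 : (k : Int) + 7 = ((k + 1 : Nat) : Int) + ((6 : Nat) : Int) := by push_cast; ring
        have hr : PySem.List.pyRange ((k : Int) + 1) ((k : Int) + 7) 1
            = PySem.List.pyRange ((k + 1 : Nat) : Int) (((k + 1 : Nat) : Int) + ((6 : Nat) : Int)) 1 := by
          rw [hc1, hc7]
        rw [hr, pvWindow data (k + 1) 6 (by omega),
            show (k : Int) + 7 = ((k + 1 + 6 : Nat) : Int) from by push_cast; ring, hc1,
            pvPm_getD data (k + 1 + 6) (by omega), pvPm_getD data (k + 1) (by omega)]
      · rw [decide_eq_false h7]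
        simp only [Bool.false_and]
    simp only [hw1, hw2]
  · rw [if_neg hs, if_neg hs]
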